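-- pv_equiv track=rewrite | github.com/M-Dickinson/BlockBot | blockbot.py | convertPiece
-- ===== SOURCE A (Python) =====
-- def convertPiece(piece):
-- 	root = (-1, -1)
-- 	vectors = [(0, 0)]
-- 	for i in range(len(piece)):
-- 		for j in range(len(piece[i])):
-- 			if piece[i][j] != '.':
-- 				if root != (-1, -1):
-- 					vectors.append((j-root[1], root[0]-i))
-- 				else:
-- 					root = (i, j)
-- 	return vectors
-- ===== SOURCE B (Python) =====
-- def convertPiece(piece):
-- 	# Two-phase decomposition: locate the root once (skip all-empty rows, then the
-- 	# first non-empty column), then emit offsets row-block by row-block with the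
-- 	# depth known up front -- no mutable root sentinel, no per-cell first-hit branch.
-- 	k = 0
-- 	while k < len(piece) and all(c == '.' for c in piece[k]):
-- 		k += 1
-- 	if k == len(piece):
-- 		return [(0, 0)]
-- 	row, rest = piece[k], piece[k + 1:]
-- 	rj = next(j for j, c in enumerate(row) if c != '.')
-- 	vectors = [(0, 0)]
-- 	for t, c in enumerate(row[rj + 1:]):
-- 		if c != '.':
-- 			vectors.append((t + 1, 0))
-- 	for d, r in enumerate(rest):
-- 		for j, c in enumerate(r):
-- 			if c != '.':
-- 				vectors.append((j - rj, -(d + 1)))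
-- 	return vectors
-- ===== Notes on version B (the rewrite author's own statement) =====
-- stated objective: alternative
-- what changed: Replaces A's single stateful scan with a mutable root sentinel tested at every cell by a two-phase algorithm: phase 1 locates the root (a while loop skipping all-empty rows, then the first non-empty column of the root row), phase 2 emits the remainder of the root row at height 0 and each later row at a depth known up front, so no first-hit branch exists in the emitting loops.
import Mathlib
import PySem

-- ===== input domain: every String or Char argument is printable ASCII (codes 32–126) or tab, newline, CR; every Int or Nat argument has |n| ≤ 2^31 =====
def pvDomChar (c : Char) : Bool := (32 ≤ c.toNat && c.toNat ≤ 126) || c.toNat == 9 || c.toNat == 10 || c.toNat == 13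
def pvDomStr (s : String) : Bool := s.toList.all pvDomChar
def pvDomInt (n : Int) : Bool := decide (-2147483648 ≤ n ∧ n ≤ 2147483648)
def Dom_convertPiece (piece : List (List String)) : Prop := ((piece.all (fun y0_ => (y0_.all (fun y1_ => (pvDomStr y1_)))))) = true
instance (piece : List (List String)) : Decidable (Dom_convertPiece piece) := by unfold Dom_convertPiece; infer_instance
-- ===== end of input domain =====

-- B replaces A's stateful root-sentinel scan by a two-phase algorithm: locate the
-- root first (skip all-empty rows, then the first non-empty column), then emit the
-- offsets with the depth known up front (alternative decomposition; same cost).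

-- ===== PORT A =====
-- literal transliteration of A's nested loop with state (root, vectors)
def convertPiece (piece : List (List String)) : List (Int × Int) :=
  let st :=
    (PySem.List.enumerate piece).foldl
      (fun (st : (Int × Int) × List (Int × Int)) pi =>
        (PySem.List.enumerate pi.2).foldl
          (fun st pj =>
            if pj.2 ≠ "." then
              if st.1 ≠ (-1, -1) then
                (st.1, st.2 ++ [(pj.1 - st.1.2, st.1.1 - pi.1)])
              else
                ((pi.1, pj.1), st.2)
            else st)
          st)
      ((-1, -1), [(0, 0)])
  st.2

-- ===== PORT B =====
-- literal transliteration of Source B: the while loop skipping all-empty rows is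
-- List.dropWhile, next(j for j,c in enumerate(row) if c != '.') is List.findIdx
-- (both exact here: the while loop computes exactly the dropWhile split, and the
-- root row is guaranteed non-empty), then the two emitting loops.
def convertPiece_alt (piece : List (List String)) : List (Int × Int) :=
  match piece.dropWhile (fun r => r.all (fun c => c == ".")) with
  | [] => [(0, 0)]
  | row :: rest =>
    let rjN : Nat := row.findIdx (fun c => c != ".")
    let v1 : List (Int × Int) :=
      (PySem.List.enumerate (row.drop (rjN + 1))).foldl
        (fun acc p => if p.2 ≠ "." then acc ++ [(p.1 + 1, 0)] else acc) [(0, 0)]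
    (PySem.List.enumerate rest).foldl
      (fun acc pr =>
        (PySem.List.enumerate pr.2).foldl
          (fun acc pj => if pj.2 ≠ "." then acc ++ [(pj.1 - (rjN : Int), -(pr.1 + 1))] else acc)
          acc)
      v1

-- ===== PRECONDITION & SPEC =====
def Spec_convertPiece (piece : List (List String)) (out : List (Int × Int)) : Prop := out = convertPiece_alt piece
instance (piece : List (List String)) (out : List (Int × Int)) : Decidable (Spec_convertPiece piece out) := by unfold Spec_convertPiece; infer_instance

-- ===== CLAIM (what is proved, stated in full; the proofs are below) =====
def Claim_equal_convertPiece : Prop := ∀ (piece : List (List String)), Dom_convertPiece piece → Spec_convertPiece piece (convertPiece piece)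

-- ===== LEMMAS AND PROOFS =====

-- the loop body of A, on a flattened cell
def pvStep (st : (Int × Int) × List (Int × Int)) (c : Int × Int) : (Int × Int) × List (Int × Int) :=
  if st.1 ≠ (-1, -1) then (st.1, st.2 ++ [(c.2 - st.1.2, st.1.1 - c.1)]) else (c, st.2)

-- the cells of one row, as A visits them (absolute coordinates)
def pvRow (i : Int) (r : List String) : List (Int × Int) :=
  ((PySem.List.enumerate r).filter (fun pj => pj.2 ≠ ".")).map (fun pj => (i, pj.1))

-- all cells of a block of rows whose first row has absolute index s
def pvCells (s : Int) (rows : List (List String)) : List (Int × Int) :=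
  (PySem.List.enumerate rows s).flatMap (fun pi => pvRow pi.1 pi.2)

theorem pv_foldl_filter_map {α β σ : Type} (p : α → Bool) (f : α → β)
    (g : σ → β → σ) (l : List α) (st : σ) :
    l.foldl (fun st x => if p x then g st (f x) else st) st
      = ((l.filter p).map f).foldl g st := by
  induction l generalizing st with
  | nil => rfl
  | cons x xs ih =>
    simp only [List.foldl_cons, List.filter_cons]
    by_cases h : p x <;> simp [h, ih]

theorem pv_foldl_flatMap {α β σ : Type} (f : α → List β) (g : σ → β → σ)
    (l : List α) (st : σ) :
    (l.flatMap f).foldl g st = l.foldl (fun st x => (f x).foldl g st) st := by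
  induction l generalizing st with
  | nil => rfl
  | cons x xs ih => simp [List.flatMap_cons, List.foldl_append, ih]

-- once the root is set (first component ≥ 0), pvStep just appends
theorem pv_fold_set (cells : List (Int × Int)) (root : Int × Int) (vecs : List (Int × Int))
    (h : 0 ≤ root.1) :
    cells.foldl pvStep (root, vecs)
      = (root, vecs ++ cells.map (fun c => (c.2 - root.2, root.1 - c.1))) := by
  induction cells generalizing vecs with
  | nil => simp
  | cons c rest ih =>
    have hne : root ≠ ((-1 : Int), (-1 : Int)) := by
      intro he; rw [he] at h; norm_num at h
    simp only [List.foldl_cons, pvStep, if_pos hne, ih, List.map_cons, List.append_assoc,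
      List.singleton_append]

theorem pv_fold_cells_cons (ri rj : Int) (rest : List (Int × Int)) (h : 0 ≤ ri) :
    (List.foldl pvStep ((-1, -1), [((0 : Int), (0 : Int))]) ((ri, rj) :: rest)).2
      = [(0, 0)] ++ rest.map (fun c => (c.2 - rj, ri - c.1)) := by
  simp only [List.foldl_cons, pvStep]
  rw [if_neg (by simp)]
  rw [pv_fold_set rest (ri, rj) _ h]

-- A computes its result from the flat cell list
theorem pv_A_char (piece : List (List String)) :
    convertPiece piece
      = (match pvCells 0 piece with
         | [] => [(0, 0)]
         | (ri, rj) :: rest => [(0, 0)] ++ rest.map (fun c => (c.2 - rj, ri - c.1))) := by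
  unfold convertPiece
  have hbody : ∀ (st : (Int × Int) × List (Int × Int)) (pi : Int × List String),
      (PySem.List.enumerate pi.2).foldl
        (fun st pj =>
          if pj.2 ≠ "." then
            if st.1 ≠ (-1, -1) then
              (st.1, st.2 ++ [(pj.1 - st.1.2, st.1.1 - pi.1)])
            else ((pi.1, pj.1), st.2)
          else st) st
      = (pvRow pi.1 pi.2).foldl pvStep st := by
    intro st pi
    unfold pvRow
    rw [← pv_foldl_filter_map (fun pj : Int × String => pj.2 ≠ ".")
      (fun pj : Int × String => (pi.1, pj.1)) pvStep (PySem.List.enumerate pi.2) st]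
    simp only [pvStep]
    congr 1
    funext st pj
    by_cases h : pj.2 = "." <;> simp [h]
  dsimp only
  simp only [hbody]
  rw [show ((PySem.List.enumerate piece).foldl (fun st pi => (pvRow pi.1 pi.2).foldl pvStep st)
        ((-1, -1), [((0:Int), (0:Int))]))
      = ((pvCells 0 piece).foldl pvStep ((-1, -1), [((0:Int), (0:Int))])) by
    unfold pvCells; rw [pv_foldl_flatMap]]
  have hnn : ∀ c ∈ pvCells 0 piece, 0 ≤ c.1 := by
    intro c hc
    obtain ⟨pi, hpi, hc2⟩ := List.mem_flatMap.mp hc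
    obtain ⟨pj, _, rfl⟩ := List.mem_map.mp hc2
    rw [PySem.List.mem_enumerate_iff] at hpi
    obtain ⟨k, hk, hpe⟩ := hpi
    subst hpe
    simp
  rcases hcells : pvCells 0 piece with _ | ⟨⟨ri, rj⟩, rest⟩
  · rfl
  · have hc : (0 : Int) ≤ ri := hnn (ri, rj) (by rw [hcells]; exact List.mem_cons_self ..)
    simpa using pv_fold_cells_cons ri rj rest hc

-- shifting the enumeration start
theorem pv_enumerate_shift {α : Type} (xs : List α) (t s : Int) :
    PySem.List.enumerate xs (t + s) = (PySem.List.enumerate xs t).map (fun p => (p.1 + s, p.2)) := by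
  induction xs generalizing t with
  | nil => simp [PySem.List.enumerate_nil]
  | cons x xs ih =>
    rw [PySem.List.enumerate_cons, PySem.List.enumerate_cons, List.map_cons]
    rw [show t + s + 1 = (t + 1) + s by ring, ih]

-- an all-'.' row contributes no cells
theorem pv_row_empty (i : Int) (r : List String) (h : r.all (fun c => c == ".") = true) :
    pvRow i r = [] := by
  unfold pvRow
  rw [List.filter_eq_nil_iff.mpr, List.map_nil]
  intro p hp
  rw [PySem.List.mem_enumerate_iff] at hp
  obtain ⟨k, hk, rfl⟩ := hp
  have := List.all_eq_true.mp h _ (List.getElem_mem hk)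
  simp only [beq_iff_eq] at this
  simp [this]

theorem pv_cells_cons (s : Int) (r : List String) (rs : List (List String)) :
    pvCells s (r :: rs) = pvRow s r ++ pvCells (s + 1) rs := by
  unfold pvCells
  rw [PySem.List.enumerate_cons, List.flatMap_cons]

theorem pv_cells_empty (s : Int) (E : List (List String))
    (h : ∀ r ∈ E, r.all (fun c => c == ".") = true) :
    pvCells s E = [] := by
  induction E generalizing s with
  | nil => rfl
  | cons r rs ih =>
    rw [pv_cells_cons, pv_row_empty s r (h r (List.mem_cons_self ..)),
      ih (s + 1) (fun r hr => h r (List.mem_cons_of_mem _ hr)), List.nil_append]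

theorem pv_cells_append (s : Int) (xs ys : List (List String)) :
    pvCells s (xs ++ ys) = pvCells s xs ++ pvCells (s + xs.length) ys := by
  unfold pvCells
  rw [PySem.List.enumerate_append, List.flatMap_append]

-- the root row splits into its root cell and the cells after it
theorem pv_row_root (i : Int) (row : List String)
    (hrow : row.all (fun c => c == ".") = false) :
    pvRow i row
      = (i, ((row.findIdx (fun c => c != ".") : Nat) : Int))
          :: ((PySem.List.enumerate (row.drop (row.findIdx (fun c => c != ".") + 1))
                ((row.findIdx (fun c => c != ".") : Nat) + 1)).filter
              (fun pj => pj.2 ≠ ".")).map (fun pj => (i, pj.1)) := by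
  have hex : ∃ c ∈ row, (c != ".") = true := by
    rw [List.all_eq_false] at hrow
    obtain ⟨c, hc, hne⟩ := hrow
    exact ⟨c, hc, by simpa using hne⟩
  have hlt : row.findIdx (fun c => c != ".") < row.length := List.findIdx_lt_length_of_exists hex
  have hget : (row[row.findIdx (fun c => c != ".")]'hlt != ".") = true :=
    List.findIdx_getElem (p := fun c => c != ".") (xs := row) (w := hlt)
  have hsplit : row = row.take (row.findIdx (fun c => c != ".")) ++ row[(row.findIdx (fun c => c != "."))]'hlt :: row.drop ((row.findIdx (fun c => c != ".")) + 1) := by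
    conv_lhs => rw [← List.take_append_drop (row.findIdx (fun c => c != ".")) row]
    rw [List.drop_eq_getElem_cons hlt]
  have hlen : (row.take (row.findIdx (fun c => c != "."))).length = (row.findIdx (fun c => c != ".")) := by
    rw [List.length_take]; omega
  unfold pvRow
  conv_lhs => rw [hsplit]
  rw [PySem.List.enumerate_append, List.filter_append, PySem.List.enumerate_cons,
    List.filter_cons, List.map_append, hlen]
  have hpre : (PySem.List.enumerate (row.take (row.findIdx (fun c => c != "."))) 0).filter (fun pj => pj.2 ≠ ".") = [] := by
    rw [List.filter_eq_nil_iff]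
    intro p hp
    rw [PySem.List.mem_enumerate_iff] at hp
    obtain ⟨k, hk, rfl⟩ := hp
    have hk' : k < (row.findIdx (fun c => c != ".")) := by rwa [hlen] at hk
    have hdot : row[k]'(by omega) = "." := by
      simpa using List.not_of_lt_findIdx (p := fun c => c != ".") (xs := row)
        (show k < row.findIdx (fun c => c != ".") by omega)
    simp [List.getElem_take, hdot]
  rw [hpre, List.map_nil, List.nil_append]
  have hkeep : (row[(row.findIdx (fun c => c != "."))]'hlt ≠ ".") := by simpa using hget
  rw [if_pos (by simpa using hkeep), List.map_cons]
  norm_num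

-- the cells below the root row, mapped to offsets, are B's second emitting loop
theorem pv_rest_map (rest : List (List String)) (k rj : Int) :
    ∀ s : Int,
      (pvCells s rest).map (fun c => (c.2 - rj, k - c.1))
        = (PySem.List.enumerate rest (s - k - 1)).flatMap
            (fun pr => ((PySem.List.enumerate pr.2).filter (fun pj => pj.2 ≠ ".")).map
              (fun pj => (pj.1 - rj, -(pr.1 + 1)))) := by
  induction rest with
  | nil => intro s; simp [pvCells, PySem.List.enumerate_nil]
  | cons r rs ih =>
    intro s
    rw [pv_cells_cons, List.map_append, PySem.List.enumerate_cons, List.flatMap_cons]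
    congr 1
    · unfold pvRow
      rw [List.map_map]
      apply List.map_congr_left
      intro pj _
      simp only [Function.comp]
      rw [show -(s - k - 1 + 1) = k - s by ring]
    · rw [ih (s + 1)]
      congr 1
      ring_nf
  
-- ===== VERDICT (by name: the statement is the Claim_ definition above) =====
theorem convertPiece_spec : Claim_equal_convertPiece := by
  intro piece _
  unfold Spec_convertPiece
  rw [pv_A_char]
  rcases h : piece.dropWhile (fun r => r.all (fun c => c == ".")) with _ | ⟨row, rest⟩
  · -- no non-empty row at all
    have hall : ∀ r ∈ piece, r.all (fun c => c == ".") = true := by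
      intro r hr
      have : piece = piece.takeWhile (fun r => r.all (fun c => c == ".")) := by
        conv_lhs => rw [← List.takeWhile_append_dropWhile
          (p := fun r => r.all (fun c => c == ".")) (l := piece)]
        rw [h, List.append_nil]
      exact List.mem_takeWhile_imp (p := fun r => r.all (fun c => c == "."))
        (l := piece) (by rwa [← this])
    rw [pv_cells_empty 0 piece hall]
    unfold convertPiece_alt
    rw [h]
  · -- root row found
    have hpiece : piece = piece.takeWhile (fun r => r.all (fun c => c == ".")) ++ row :: rest := by
      conv_lhs => rw [← List.takeWhile_append_dropWhile
        (p := fun r => r.all (fun c => c == ".")) (l := piece), h]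
    have hrow : row.all (fun c => c == ".") = false := by
      have hne : piece.dropWhile (fun r => r.all (fun c => c == ".")) ≠ [] := by simp [h]
      have := List.head_dropWhile_not (fun (r : List String) => r.all (fun c => c == ".")) hne
      simp only [h, List.head_cons] at this
      exact this
    have hEempty : ∀ r ∈ piece.takeWhile (fun r => r.all (fun c => c == ".")),
        r.all (fun c => c == ".") = true := fun _ hr =>
      List.mem_takeWhile_imp (p := fun (r : List String) => r.all (fun c => c == ".")) hr
    set E := piece.takeWhile (fun r => r.all (fun c => c == ".")) with hE
    set k : Int := (E.length : Int) with hk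
    set rjN : Nat := row.findIdx (fun c => c != ".") with hrjN
    have hcells : pvCells 0 piece
        = (k, (rjN : Int))
            :: (((PySem.List.enumerate (row.drop (rjN + 1)) ((rjN : Nat) + 1)).filter
                  (fun pj => pj.2 ≠ ".")).map (fun pj => (k, pj.1))
              ++ pvCells (k + 1) rest) := by
      conv_lhs => rw [hpiece]
      rw [pv_cells_append, pv_cells_empty 0 E hEempty, List.nil_append, pv_cells_cons,
        pv_row_root (0 + (E.length : Int)) row hrow]
      rw [← hrjN]
      rw [show (0 : Int) + (E.length : Int) = k by rw [hk]; ring]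
      rw [List.cons_append]
    rw [hcells]
    -- evaluate B
    unfold convertPiece_alt
    rw [h]
    simp only [← hrjN]
    rw [PySem.List.foldl_append_ite]
    have houter : ∀ (acc : List (Int × Int)),
        (PySem.List.enumerate rest).foldl
          (fun acc pr =>
            (PySem.List.enumerate pr.2).foldl
              (fun acc pj => if pj.2 ≠ "." then acc ++ [(pj.1 - (rjN : Int), -(pr.1 + 1))] else acc)
              acc) acc
        = acc ++ (PySem.List.enumerate rest).flatMap
            (fun pr => ((PySem.List.enumerate pr.2).filter (fun pj => pj.2 ≠ ".")).map
              (fun pj => (pj.1 - (rjN : Int), -(pr.1 + 1)))) := by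
      intro acc
      rw [show (fun (acc : List (Int × Int)) (pr : Int × List String) =>
            (PySem.List.enumerate pr.2).foldl
              (fun acc pj => if pj.2 ≠ "." then acc ++ [(pj.1 - (rjN : Int), -(pr.1 + 1))] else acc)
              acc)
          = (fun acc pr => acc ++ ((PySem.List.enumerate pr.2).filter
              (fun pj => decide (pj.2 ≠ "."))).map
              (fun pj => (pj.1 - (rjN : Int), -(pr.1 + 1)))) by
        funext acc pr
        rw [PySem.List.foldl_append_ite]]
      rw [PySem.List.foldl_append_eq_flatMap]
    rw [houter]
    -- now compare the two pure lists
    simp only [List.map_append, List.cons_append, List.nil_append]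
    congr 1
    congr 1
    · -- the remainder of the root row
      rw [List.map_map]
      rw [show ((rjN : Nat) + 1 : Int) = 0 + ((rjN : Nat) + 1 : Int) by ring,
        pv_enumerate_shift, List.filter_map, List.map_map]
      apply List.map_congr_left
      intro pj hpj
      simp only [Function.comp]
      simp only [Prod.mk.injEq]
      refine ⟨by ring, by ring⟩
    · -- the rows below the root row
      rw [pv_rest_map rest k (rjN : Int) (k + 1)]
      rw [show k + 1 - k - 1 = 0 by ring]
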